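-- pv_equiv track=rewrite | github.com/svend4/meta | projects/hexglyph/solan_recurrence.py | recurrence_matrix
-- ===== SOURCE A (Python) =====
-- _DEFAULT_EPS   = 0           # exact recurrence
--
-- def state_hamming(row1: list[int], row2: list[int]) -> int:
--     """Суммарное Q6-хэмминг-расстояние между двумя состояниями CA."""
--     return sum(bin(a ^ b).count('1') for a, b in zip(row1, row2))
--
-- def recurrence_matrix(
--     rows: list[list[int]],
--     eps:  int = _DEFAULT_EPS,
-- ) -> list[list[int]]:
--     """Рекуррентная матрица R[i][j] = 1 iff H(row_i, row_j) ≤ ε."""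
--     N = len(rows)
--     R: list[list[int]] = []
--     for i in range(N):
--         r: list[int] = []
--         for j in range(N):
--             r.append(1 if state_hamming(rows[i], rows[j]) <= eps else 0)
--         R.append(r)
--     return R
-- ===== SOURCE B (Python) =====
-- def recurrence_matrix(rows: list[list[int]], eps: int = 0) -> list[list[int]]:
--     # Two staged passes exploiting symmetry of Hamming distance:
--     # (1) compute only the upper triangle tri[i] = thresholds for j in i..N-1,
--     # (2) assemble the full matrix reading the lower triangle from the triangle.
--     N = len(rows)
--     tri = [[1 if sum((a ^ b).bit_count() for a, b in zip(rows[i], rows[j])) <= eps else 0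
--             for j in range(i, N)]
--            for i in range(N)]
--     return [[tri[i][j - i] if j >= i else tri[j][i - j] for j in range(N)]
--             for i in range(N)]
-- ===== Notes on version B (the rewrite author's own statement) =====
-- stated objective: faster
-- what changed: B replaces A's full N x N double loop of appends by two staged comprehensions: it first computes only the upper triangle of threshold values (using int.bit_count over zipped rows instead of bin().count), then assembles the full matrix by index arithmetic, mirroring the lower triangle from the triangle table, so only about half the Hamming distances are computed.
import Mathlib
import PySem

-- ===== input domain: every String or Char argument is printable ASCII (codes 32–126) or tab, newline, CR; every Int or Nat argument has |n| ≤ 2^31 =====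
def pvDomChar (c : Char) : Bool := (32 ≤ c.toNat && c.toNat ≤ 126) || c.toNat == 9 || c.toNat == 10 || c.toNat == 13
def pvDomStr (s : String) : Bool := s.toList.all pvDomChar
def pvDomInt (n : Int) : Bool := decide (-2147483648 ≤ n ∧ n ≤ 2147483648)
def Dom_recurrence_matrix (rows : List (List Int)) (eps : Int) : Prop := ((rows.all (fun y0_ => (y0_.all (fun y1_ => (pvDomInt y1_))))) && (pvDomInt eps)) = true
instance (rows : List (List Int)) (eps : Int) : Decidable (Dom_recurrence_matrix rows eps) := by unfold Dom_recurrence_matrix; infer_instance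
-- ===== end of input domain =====

-- B computes only the upper triangle of threshold values in a first pass, then assembles
-- the full matrix in a second pass, mirroring the lower triangle by symmetry of the
-- Hamming distance; same matrix, about half the distance computations.

-- ===== PORT A =====
-- state_hamming: sum(bin(a ^ b).count('1') for a, b in zip(row1, row2));
-- bin(x).count('1') on Python ints (incl. negatives) = PySem.Int.bitCount (reads |n|), exact.
def state_hamming (row1 row2 : List Int) : Int :=
  (row1.zip row2).foldl (fun acc p => acc + (PySem.Int.bitCount (PySem.Int.bxor p.1 p.2) : Int)) 0

def recurrence_matrix (rows : List (List Int)) (eps : Int) : List (List Int) :=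
  let N := rows.length
  (List.range N).foldl (fun R i =>
    R ++ [(List.range N).foldl (fun r j =>
      r ++ [if state_hamming (rows.getD i []) (rows.getD j []) ≤ eps then 1 else 0]) []]) []

-- ===== PORT B =====
-- sum((a ^ b).bit_count() for a, b in zip(rows[i], rows[j])); int.bit_count on negatives
-- counts the bits of |n|, which is PySem.Int.bitCount, exact.
def hamming_alt (r1 r2 : List Int) : Int :=
  ((r1.zip r2).map (fun p => (PySem.Int.bitCount (PySem.Int.bxor p.1 p.2) : Int))).sum

def recurrence_matrix_alt (rows : List (List Int)) (eps : Int) : List (List Int) :=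
  let N := rows.length
  let tri := (List.range N).map (fun i =>
    (List.range' i (N - i)).map (fun j =>
      if hamming_alt (rows.getD i []) (rows.getD j []) ≤ eps then (1 : Int) else 0))
  (List.range N).map (fun i => (List.range N).map (fun j =>
    if i ≤ j then (tri.getD i []).getD (j - i) 0 else (tri.getD j []).getD (i - j) 0))

-- ===== PRECONDITION & SPEC =====
def Spec_recurrence_matrix (rows : List (List Int)) (eps : Int) (out : List (List Int)) : Prop := out = recurrence_matrix_alt rows eps
instance (rows : List (List Int)) (eps : Int) (out : List (List Int)) : Decidable (Spec_recurrence_matrix rows eps out) := by unfold Spec_recurrence_matrix; infer_instance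

-- ===== CLAIM (what is proved, stated in full; the proofs are below) =====
def Claim_equal_recurrence_matrix : Prop := ∀ (rows : List (List Int)) (eps : Int), Dom_recurrence_matrix rows eps → Spec_recurrence_matrix rows eps (recurrence_matrix rows eps)

-- ===== LEMMAS AND PROOFS =====

-- the entry both programs compute
def pvCell (rows : List (List Int)) (eps : Int) (i j : Nat) : Int :=
  if state_hamming (rows.getD i []) (rows.getD j []) ≤ eps then 1 else 0

lemma hamming_alt_eq (r1 r2 : List Int) : hamming_alt r1 r2 = state_hamming r1 r2 := by
  unfold hamming_alt state_hamming
  rw [List.sum_eq_foldl, List.foldl_map]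

lemma state_hamming_comm (r1 r2 : List Int) : state_hamming r1 r2 = state_hamming r2 r1 := by
  rw [← hamming_alt_eq, ← hamming_alt_eq]
  unfold hamming_alt
  induction r1 generalizing r2 with
  | nil => cases r2 <;> rfl
  | cons a t ih =>
    cases r2 with
    | nil => rfl
    | cons b s => simp [PySem.Int.bxor_comm, ih s]

lemma pvCell_comm (rows : List (List Int)) (eps : Int) (i j : Nat) :
    pvCell rows eps i j = pvCell rows eps j i := by
  unfold pvCell; rw [state_hamming_comm]

lemma foldl_append_singleton_map {α β : Type} (f : α → β) (l : List α) (init : List β) :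
    l.foldl (fun r x => r ++ [f x]) init = init ++ l.map f := by
  induction l generalizing init with
  | nil => simp
  | cons a t ih => simp [ih]

lemma getD_map_range {α : Type} (f : Nat → α) (n j : Nat) (d : α) (h : j < n) :
    ((List.range n).map f).getD j d = f j := by
  rw [List.getD_eq_getElem?_getD]; simp [h]

lemma getD_map_range' {α : Type} (f : Nat → α) (s n k : Nat) (d : α) (h : k < n) :
    ((List.range' s n).map f).getD k d = f (s + k) := by
  rw [List.getD_eq_getElem?_getD]; simp [h]

-- A computes the full map matrix
lemma recurrence_matrix_eq_map (rows : List (List Int)) (eps : Int) :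
    recurrence_matrix rows eps
      = (List.range rows.length).map (fun i => (List.range rows.length).map (pvCell rows eps i)) := by
  unfold recurrence_matrix
  rw [foldl_append_singleton_map (fun i => (List.range rows.length).foldl (fun r j =>
      r ++ [if state_hamming (rows.getD i []) (rows.getD j []) ≤ eps then 1 else 0]) [])]
  simp only [List.nil_append]
  refine List.map_congr_left (fun i _ => ?_)
  rw [foldl_append_singleton_map]
  simp [pvCell]

-- B's two staged passes also build the map matrix
lemma recurrence_matrix_alt_eq_map (rows : List (List Int)) (eps : Int) :
    recurrence_matrix_alt rows eps
      = (List.range rows.length).map (fun i => (List.range rows.length).map (pvCell rows eps i)) := by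
  unfold recurrence_matrix_alt
  refine List.map_congr_left (fun i hi => ?_)
  refine List.map_congr_left (fun j hj => ?_)
  have hiN : i < rows.length := List.mem_range.mp hi
  have hjN : j < rows.length := List.mem_range.mp hj
  by_cases hij : i ≤ j
  · rw [if_pos hij,
      getD_map_range (fun i => (List.range' i (rows.length - i)).map (fun j =>
        if hamming_alt (rows.getD i []) (rows.getD j []) ≤ eps then (1 : Int) else 0)) _ i [] hiN,
      getD_map_range' _ i (rows.length - i) (j - i) 0 (by omega),
      Nat.add_sub_cancel' hij, hamming_alt_eq]
    rfl
  · have hji : j ≤ i := le_of_not_ge hij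
    rw [if_neg hij,
      getD_map_range (fun i => (List.range' i (rows.length - i)).map (fun j =>
        if hamming_alt (rows.getD i []) (rows.getD j []) ≤ eps then (1 : Int) else 0)) _ j [] hjN,
      getD_map_range' _ j (rows.length - j) (i - j) 0 (by omega),
      Nat.add_sub_cancel' hji, hamming_alt_eq]
    exact (show pvCell rows eps j i = pvCell rows eps i j from pvCell_comm rows eps j i)

-- ===== VERDICT (by name: the statement is the Claim_ definition above) =====
theorem recurrence_matrix_spec : Claim_equal_recurrence_matrix := by
  intro rows eps _
  unfold Spec_recurrence_matrix
  rw [recurrence_matrix_eq_map, recurrence_matrix_alt_eq_map]
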